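-- pv_equiv track=rewrite | github.com/vlongle/articulate-anything | articulate_anything/api/odio_urdf.py | find_non_helper_parent
-- ===== SOURCE A (Python) =====
-- def find_non_helper_parent(tree_dict, link):
--     if "helper" not in link.lower():
--         return link
--     for parent, children in tree_dict.items():
--         for child, _, _, _ in children:
--             if child == link:
--                 return find_non_helper_parent(tree_dict, parent)
--     return link  # Return original link if no non-helper parent found
-- ===== SOURCE B (Python) =====
-- def find_non_helper_parent(tree_dict, link):
--     edges = [(child, parent)
--              for parent, children in tree_dict.items()
--              for child, _, _, _ in children]
--     parent_of = dict(reversed(edges))  # last write wins => first occurrence in edges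
--     current = link
--     while "helper" in current.lower():
--         if current not in parent_of:
--             break
--         current = parent_of[current]
--     return current
-- ===== Notes on version B (the rewrite author's own statement) =====
-- stated objective: alternative
-- what changed: B flattens the tree into a (child,parent) edge list in one comprehension, builds a child->first-parent map via dict(reversed(edges)) (last write wins), and climbs it with a while loop, instead of A's recursion that rescans the whole tree_dict with a nested double loop at every level.
import Mathlib
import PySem

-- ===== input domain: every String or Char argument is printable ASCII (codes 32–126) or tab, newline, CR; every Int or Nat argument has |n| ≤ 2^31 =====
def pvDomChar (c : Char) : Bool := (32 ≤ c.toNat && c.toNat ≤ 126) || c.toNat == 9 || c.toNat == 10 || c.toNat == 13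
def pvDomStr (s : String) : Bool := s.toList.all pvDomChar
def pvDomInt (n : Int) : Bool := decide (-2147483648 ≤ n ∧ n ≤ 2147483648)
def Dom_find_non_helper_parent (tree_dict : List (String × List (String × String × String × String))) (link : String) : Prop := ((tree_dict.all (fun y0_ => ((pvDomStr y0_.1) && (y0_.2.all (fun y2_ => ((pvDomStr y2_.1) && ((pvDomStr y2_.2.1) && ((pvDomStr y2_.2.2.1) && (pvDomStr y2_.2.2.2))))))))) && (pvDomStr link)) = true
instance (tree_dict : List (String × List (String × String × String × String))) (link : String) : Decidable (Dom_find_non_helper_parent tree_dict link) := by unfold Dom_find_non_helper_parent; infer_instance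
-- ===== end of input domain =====

-- B flattens the tree into a (child, parent) edge list, builds a child→first-parent
-- map by inserting the reversed edges (last write wins), and climbs it with a loop,
-- instead of A's recursion that rescans the whole tree at every level (objective:
-- alternative).

-- ===== PORT A =====
-- inner 'for child, _, _, _ in children: if child == link'
def pvChildHit : List (String × String × String × String) → String → Bool
  | [], _ => false
  | (c, _, _, _) :: rest, link => if c == link then true else pvChildHit rest link

-- outer 'for parent, children in tree_dict.items()', returning the first matching parent
def pvScanA : List (String × List (String × String × String × String)) → String → Option String
  | [], _ => none
  | (p, cs) :: rest, link => if pvChildHit cs link then some p else pvScanA rest link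

-- A's recursion, with fuel tree_dict.length + 1 (enough for every terminating run of the
-- Python; where the fuel would run out the Python recurses forever — excluded by Pre_)
def pvFindA (tree_dict : List (String × List (String × String × String × String))) : Nat → String → String
  | 0, link => link
  | f + 1, link =>
    if !(PySem.Str.isIn "helper" (PySem.Str.lower link)) then link
    else
      match pvScanA tree_dict link with
      | some p => pvFindA tree_dict f p
      | none => link

def find_non_helper_parent (tree_dict : List (String × List (String × String × String × String))) (link : String) : String :=
  pvFindA tree_dict (tree_dict.length + 1) link

-- ===== PORT B =====
-- 'edges = [(child, parent) for parent, children in tree_dict.items() for child, _, _, _ in children]'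
def pvEdges (tree_dict : List (String × List (String × String × String × String))) : List (String × String) :=
  tree_dict.flatMap (fun pc => pc.2.map (fun c => (c.1, pc.1)))

-- 'parent_of = dict(reversed(edges))' — insert the reversed pairs in order, last write wins
def pvParentOf (tree_dict : List (String × List (String × String × String × String))) : PySem.Dict String String :=
  (pvEdges tree_dict).reverse.foldl (fun d e => d.insert e.1 e.2) PySem.Dict.empty

-- the while loop, fueled by tree_dict.length + 1: enough for every terminating run of
-- the Python loop (the climbed parents are distinct keys of tree_dict); where it would
-- run out the Python loop never exits — excluded by Pre_.  'parent_of[current]' is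
-- guarded by the membership test, so the (get? …).getD "" indexing never takes its
-- default; this makes the guarded subscript exact.
def pvClimb (pd : PySem.Dict String String) : Nat → String → String
  | 0, cur => cur
  | f + 1, cur =>
    if PySem.Str.isIn "helper" (PySem.Str.lower cur) then
      if !(pd.contains cur) then cur
      else pvClimb pd f ((pd.get? cur).getD "")
    else cur

def find_non_helper_parent_alt (tree_dict : List (String × List (String × String × String × String))) (link : String) : String :=
  pvClimb (pvParentOf tree_dict) (tree_dict.length + 1) link

-- ===== PRECONDITION & SPEC =====
-- the first parent (in dict order) whose children contain s, as A and B both select it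
def pvNextParent (tree_dict : List (String × List (String × String × String × String))) (s : String) : Option String :=
  tree_dict.findSome? (fun pc => if pc.2.any (fun c => c.1 == s) then some pc.1 else none)

-- one climbing step: defined iff s is helper-named and has a parent
def pvStep (tree_dict : List (String × List (String × String × String × String))) (s : String) : Option String :=
  if PySem.Str.isIn "helper" (PySem.Str.lower s) then pvNextParent tree_dict s else none

-- pvAlive n s = true iff the helper→first-parent chain from s survives n steps
def pvAlive (tree_dict : List (String × List (String × String × String × String))) : Nat → String → Bool
  | 0, _ => true
  | n + 1, s =>
    match pvStep tree_dict s with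
    | some p => pvAlive tree_dict n p
    | none => false

-- Pre_ excludes the inputs on which the helper→first-parent chain from link never ends
-- (a cycle of helper-named links): there Python A raises RecursionError (and Python B
-- loops); a terminating chain always ends within tree_dict.length + 1 steps, so this
-- excludes nothing on which A returns.
def Pre_find_non_helper_parent (tree_dict : List (String × List (String × String × String × String))) (link : String) : Prop :=
  pvAlive tree_dict (tree_dict.length + 2) link = false

instance (tree_dict : List (String × List (String × String × String × String))) (link : String) : Decidable (Pre_find_non_helper_parent tree_dict link) := by unfold Pre_find_non_helper_parent; infer_instance

def pvWitness_find_non_helper_parent : (List (String × List (String × String × String × String))) × String :=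
  ([("base", [("helper_arm", "a", "b", "c")])], "helper_arm")

def Spec_find_non_helper_parent (tree_dict : List (String × List (String × String × String × String))) (link : String) (out : String) : Prop := out = find_non_helper_parent_alt tree_dict link
instance (tree_dict : List (String × List (String × String × String × String))) (link : String) (out : String) : Decidable (Spec_find_non_helper_parent tree_dict link out) := by unfold Spec_find_non_helper_parent; infer_instance

-- ===== CLAIM (what is proved, stated in full; the proofs are below) =====
def Claim_equal_find_non_helper_parent : Prop := ∀ (tree_dict : List (String × List (String × String × String × String))) (link : String), Dom_find_non_helper_parent tree_dict link → Pre_find_non_helper_parent tree_dict link → Spec_find_non_helper_parent tree_dict link (find_non_helper_parent tree_dict link)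

-- ===== LEMMAS AND PROOFS =====

-- A's double scan computes pvNextParent
theorem pvChildHit_eq_any (cs : List (String × String × String × String)) (s : String) :
    pvChildHit cs s = cs.any (fun c => c.1 == s) := by
  induction cs with
  | nil => rfl
  | cons c rest ih =>
    obtain ⟨c1, c2, c3, c4⟩ := c
    simp [pvChildHit, ih]
    by_cases h : c1 = s <;> simp [h]

theorem pvScanA_eq_nextParent (tree_dict : List (String × List (String × String × String × String))) (s : String) :
    pvScanA tree_dict s = pvNextParent tree_dict s := by
  induction tree_dict with
  | nil => rfl
  | cons pc rest ih =>
    obtain ⟨p, cs⟩ := pc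
    simp only [pvScanA, pvNextParent, List.findSome?, pvChildHit_eq_any]
    by_cases h : cs.any (fun c => c.1 == s) = true <;>
      simp [h, ih, pvNextParent]

-- lookup in a foldl of overwriting inserts: the LAST occurrence in the inserted list wins
theorem get?_foldl_insert (l : List (String × String)) (d : PySem.Dict String String) (s : String) :
    (l.foldl (fun d e => d.insert e.1 e.2) d).get? s =
      (l.reverse.findSome? (fun e => if e.1 == s then some e.2 else none)).or (d.get? s) := by
  induction l generalizing d with
  | nil => simp
  | cons e t ih =>
    obtain ⟨c, p⟩ := e
    simp only [List.foldl_cons, ih, List.reverse_cons, List.findSome?_append]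
    rw [PySem.Dict.get?_insert]
    by_cases h : s = c
    · subst h
      cases t.reverse.findSome? (fun e => if e.1 == s then some e.2 else none) <;>
        simp
    · cases t.reverse.findSome? (fun e => if e.1 == s then some e.2 else none) <;>
        simp [List.findSome?, h, Ne.symm h]

-- findSome? over one parent's mapped children block
theorem findSome?_map_children (p s : String) (cs : List (String × String × String × String)) :
    (cs.map (fun c => (c.1, p))).findSome? (fun e => if e.1 == s then some e.2 else none) =
      (if cs.any (fun c => c.1 == s) then some p else none) := by
  induction cs with
  | nil => rfl
  | cons c t ihc =>
    simp only [List.map_cons, List.findSome?_cons, List.any_cons]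
    by_cases h : c.1 = s
    · simp [h]
    · have hb : (c.1 == s) = false := by simp [h]
      simp only [hb]
      simpa using ihc

-- findSome? over the flattened edge list is pvNextParent
theorem findSome?_edges (tree_dict : List (String × List (String × String × String × String))) (s : String) :
    (pvEdges tree_dict).findSome? (fun e => if e.1 == s then some e.2 else none) =
      pvNextParent tree_dict s := by
  induction tree_dict with
  | nil => rfl
  | cons pc rest ih =>
    obtain ⟨p, cs⟩ := pc
    simp only [pvEdges, List.flatMap_cons, List.findSome?_append, pvNextParent,
      List.findSome?_cons]
    rw [findSome?_map_children]
    by_cases h : (cs.any fun c => c.1 == s) = true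
    · simp [h]
    · simp only [Bool.not_eq_true] at h
      rw [h]
      simpa [pvEdges, pvNextParent] using ih

-- B's one-shot index computes pvNextParent
theorem get?_pvParentOf (tree_dict : List (String × List (String × String × String × String))) (s : String) :
    (pvParentOf tree_dict).get? s = pvNextParent tree_dict s := by
  rw [pvParentOf, get?_foldl_insert, List.reverse_reverse, findSome?_edges]
  simp [PySem.Dict.get?_empty]

-- one unfolding step of A's fueled recursion, phrased through pvStep
theorem pvFindA_succ (tree_dict : List (String × List (String × String × String × String))) (f : Nat) (cur : String) :
    pvFindA tree_dict (f + 1) cur =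
      match pvStep tree_dict cur with
      | some p => pvFindA tree_dict f p
      | none => cur := by
  simp only [pvFindA, pvStep]
  rw [pvScanA_eq_nextParent]
  generalize PySem.Str.isIn "helper" (PySem.Str.lower cur) = b
  cases b <;> simp

-- one unfolding step of B's fueled loop, phrased through pvStep
theorem pvClimb_succ (tree_dict : List (String × List (String × String × String × String))) (g : Nat) (cur : String) :
    pvClimb (pvParentOf tree_dict) (g + 1) cur =
      match pvStep tree_dict cur with
      | some p => pvClimb (pvParentOf tree_dict) g p
      | none => cur := by
  simp only [pvClimb, pvStep]
  have hc := PySem.Dict.contains_eq_isSome_get? (pvParentOf tree_dict) cur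
  rw [get?_pvParentOf] at hc
  generalize hb : PySem.Str.isIn "helper" (PySem.Str.lower cur) = b
  cases b
  · simp
  · cases hn : pvNextParent tree_dict cur with
    | none => simp [hc, hn]
    | some p => simp [hc, hn, get?_pvParentOf]

-- both fueled programs compute the same chain when the chain dies within each fuel
theorem pvFindA_eq_pvClimb (tree_dict : List (String × List (String × String × String × String))) :
    ∀ (f g : Nat) (cur : String),
      pvAlive tree_dict (f + 1) cur = false → pvAlive tree_dict (g + 1) cur = false →
      pvFindA tree_dict f cur = pvClimb (pvParentOf tree_dict) g cur := by
  intro f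
  induction f with
  | zero =>
    intro g cur hf _
    have hstep : pvStep tree_dict cur = none := by
      cases h : pvStep tree_dict cur with
      | none => rfl
      | some p => simp [pvAlive, h] at hf
    cases g with
    | zero => rfl
    | succ g' => rw [pvClimb_succ, hstep]; rfl
  | succ f' ih =>
    intro g cur hf hg
    cases hstep : pvStep tree_dict cur with
    | none =>
      rw [pvFindA_succ, hstep]
      cases g with
      | zero => rfl
      | succ g' => rw [pvClimb_succ, hstep]
    | some p =>
      have hf' : pvAlive tree_dict (f' + 1) p = false := by
        simpa [pvAlive, hstep] using hf
      cases g with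
      | zero => simp [pvAlive, hstep] at hg
      | succ g' =>
        have hg' : pvAlive tree_dict (g' + 1) p = false := by
          simpa [pvAlive, hstep] using hg
        rw [pvFindA_succ, hstep, pvClimb_succ, hstep]
        exact ih g' p hf' hg'

-- ===== VERDICT (by name: the statement is the Claim_ definition above) =====
theorem find_non_helper_parent_spec : Claim_equal_find_non_helper_parent := by
  intro tree_dict link _ hpre
  unfold Spec_find_non_helper_parent find_non_helper_parent find_non_helper_parent_alt
  exact pvFindA_eq_pvClimb tree_dict (tree_dict.length + 1) (tree_dict.length + 1) link hpre hpre
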